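-- pv_equiv track=rewrite | github.com/nasha430/comment_extract | logic.py | build_body_without_spans
-- ===== SOURCE A (Python) =====
-- def merge_intervals(spans: list[tuple[int, int]]) -> list[tuple[int, int]]:
--     ordered = sorted((lo, hi) for lo, hi in spans if lo < hi)
--     if not ordered:
--         return []
--     out: list[tuple[int, int]] = []
--     cur_lo, cur_hi = ordered[0]
--     for lo, hi in ordered[1:]:
--         if lo <= cur_hi:
--             cur_hi = max(cur_hi, hi)
--         else:
--             out.append((cur_lo, cur_hi))
--             cur_lo, cur_hi = lo, hi
--     out.append((cur_lo, cur_hi))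
--     return out
--
-- def build_body_without_spans(full_text: str, spans: list[tuple[int, int]]) -> str:
--     merged = merge_intervals(spans)
--     if not merged:
--         return full_text
--     parts: list[str] = []
--     cur = 0
--     n = len(full_text)
--     for lo, hi in merged:
--         if lo > n:
--             break
--         hi = min(hi, n)
--         if cur < lo:
--             parts.append(full_text[cur:lo])
--         cur = max(cur, hi)
--     parts.append(full_text[cur:])
--     return "".join(parts)
-- ===== SOURCE B (Python) =====
-- def build_body_without_spans(full_text: str, spans: list[tuple[int, int]]) -> str:
--     # Coverage counting with a difference array: no sort/merge, no slice stitching.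
--     n = len(full_text)
--     delta = [0] * (n + 1)
--     for lo, hi in spans:
--         lo2 = max(lo, 0)
--         hi2 = min(hi, n)
--         if lo2 < hi2:
--             delta[lo2] += 1
--             delta[hi2] -= 1
--     out = []
--     depth = 0
--     for i, ch in enumerate(full_text):
--         depth += delta[i]
--         if depth == 0:
--             out.append(ch)
--     return "".join(out)
-- ===== Notes on version B (the rewrite author's own statement) =====
-- stated objective: alternative
-- what changed: Replaced the sort/merge-intervals pass plus slice stitching by a difference-array coverage count: mark span boundaries in a delta array, then one prefix-sum sweep keeps each character whose coverage depth is zero.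
import Mathlib
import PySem

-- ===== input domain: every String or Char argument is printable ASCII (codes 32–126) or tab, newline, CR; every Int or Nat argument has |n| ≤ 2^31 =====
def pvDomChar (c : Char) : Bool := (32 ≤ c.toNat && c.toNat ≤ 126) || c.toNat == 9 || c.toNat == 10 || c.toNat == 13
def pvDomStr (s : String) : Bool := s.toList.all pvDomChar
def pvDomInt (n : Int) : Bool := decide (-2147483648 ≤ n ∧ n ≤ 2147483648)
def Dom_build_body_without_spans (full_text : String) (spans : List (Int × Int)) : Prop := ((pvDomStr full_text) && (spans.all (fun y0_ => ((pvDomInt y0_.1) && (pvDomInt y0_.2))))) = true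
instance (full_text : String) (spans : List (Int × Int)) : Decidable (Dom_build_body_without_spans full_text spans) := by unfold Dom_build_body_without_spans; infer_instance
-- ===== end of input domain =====

-- B removes the sort/merge-intervals + slice-stitching pass of A and instead keeps each
-- character iff its index lies in no span (objective: simpler; return value only, no mutation).

-- ===== PORT A =====
-- merge_intervals: 'ordered = sorted((lo, hi) for lo, hi in spans if lo < hi)' then the merge loop
-- (the for-loop over ordered[1:] with state (out, cur_lo, cur_hi) is the foldl below).
def pvMergeStep (s : List (Int × Int) × Int × Int) (p : Int × Int) : List (Int × Int) × Int × Int :=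
  if p.1 ≤ s.2.2 then (s.1, s.2.1, max s.2.2 p.2)
  else (s.1 ++ [(s.2.1, s.2.2)], p.1, p.2)

def merge_intervals (spans : List (Int × Int)) : List (Int × Int) :=
  let ordered := PySem.List.sorted2 (spans.filter (fun p => decide (p.1 < p.2))) Prod.fst Prod.snd
  match ordered with
  | [] => []
  | (l0, h0) :: rest =>
      let s := rest.foldl pvMergeStep ([], l0, h0)
      s.1 ++ [(s.2.1, s.2.2)]

-- the for-loop over merged with its 'break' and the trailing parts.append(full_text[cur:]);
-- returns the list of parts (as char lists), joined by "".join below.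
def pvBuildParts (ft : List Char) (n : Int) (cur : Int) : List (Int × Int) → List (List Char)
  | [] => [PySem.List.slice ft (some cur) none]
  | (lo, hi) :: rest =>
      if lo > n then [PySem.List.slice ft (some cur) none]   -- break, then the trailing append
      else
        let hi' := min hi n
        (if cur < lo then [PySem.List.slice ft (some cur) (some lo)] else []) ++
          pvBuildParts ft n (max cur hi') rest

def build_body_without_spans (full_text : String) (spans : List (Int × Int)) : String :=
  match merge_intervals spans with
  | [] => full_text
  | m => String.ofList (PySem.Chars.join [] (pvBuildParts full_text.toList (PySem.Str.len full_text) 0 m))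

-- ===== PORT B =====
def build_body_without_spans_alt (full_text : String) (spans : List (Int × Int)) : String :=
  let n : Int := PySem.Str.len full_text
  let delta := spans.foldl (fun (d : List Int) (p : Int × Int) =>
      let lo2 := max p.1 0
      let hi2 := min p.2 n
      if lo2 < hi2 then
        let d1 := PySem.List.pySetD d lo2 (PySem.List.pyGetD d lo2 0 + 1)
        PySem.List.pySetD d1 hi2 (PySem.List.pyGetD d1 hi2 0 - 1)
      else d) (List.replicate (n.toNat + 1) (0 : Int))
  let s := (PySem.List.enumerate full_text.toList 0).foldl
      (fun (s : List Char × Int) (p : Int × Char) =>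
        let depth := s.2 + PySem.List.pyGetD delta p.1 0
        (if depth = 0 then s.1 ++ [p.2] else s.1, depth)) ([], 0)
  String.ofList s.1

-- ===== PRECONDITION & SPEC =====
def Spec_build_body_without_spans (full_text : String) (spans : List (Int × Int)) (out : String) : Prop := out = build_body_without_spans_alt full_text spans
instance (full_text : String) (spans : List (Int × Int)) (out : String) : Decidable (Spec_build_body_without_spans full_text spans out) := by unfold Spec_build_body_without_spans; infer_instance

-- ===== CLAIM (what is proved, stated in full; the proofs are below) =====
def Claim_equal_build_body_without_spans : Prop := ∀ (full_text : String) (spans : List (Int × Int)), Dom_build_body_without_spans full_text spans → Spec_build_body_without_spans full_text spans (build_body_without_spans full_text spans)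

-- ===== LEMMAS AND PROOFS =====

-- i is covered by some interval of ms
def pvCov (ms : List (Int × Int)) (i : Int) : Bool :=
  ms.any (fun q => decide (q.1 ≤ i) && decide (i < q.2))

-- the characters of ft whose index satisfies pred (enumeration starting at s)
def pvU (ft : List Char) (s : Int) (pred : Int → Bool) : List Char :=
  ((PySem.List.enumerate ft s).filter (fun p => pred p.1)).map Prod.snd

-- shape of A's merged list: strictly separated nonempty intervals
def pvShape (ms : List (Int × Int)) : Prop :=
  ms.Pairwise (fun a b => a.2 < b.1) ∧ ∀ q ∈ ms, q.1 < q.2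

theorem pvCov_nil (i : Int) : pvCov [] i = false := rfl

theorem pvCov_cons (q : Int × Int) (ms : List (Int × Int)) (i : Int) :
    pvCov (q :: ms) i = ((decide (q.1 ≤ i) && decide (i < q.2)) || pvCov ms i) := by
  simp [pvCov]

theorem pvCov_perm {l₁ l₂ : List (Int × Int)} (h : l₁.Perm l₂) (i : Int) :
    pvCov l₁ i = pvCov l₂ i := by
  unfold pvCov
  cases hb : l₂.any (fun q => decide (q.1 ≤ i) && decide (i < q.2)) with
  | true =>
      rw [List.any_eq_true] at hb ⊢
      obtain ⟨x, hx, hpx⟩ := hb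
      exact ⟨x, h.mem_iff.mpr hx, hpx⟩
  | false =>
      rw [List.any_eq_false] at hb ⊢
      intro x hx; exact hb x (h.mem_iff.mp hx)

theorem pvCov_filter (spans : List (Int × Int)) (i : Int) :
    pvCov (spans.filter (fun p => decide (p.1 < p.2))) i = pvCov spans i := by
  induction spans with
  | nil => rfl
  | cons q t ih =>
      rw [List.filter_cons]
      by_cases h : q.1 < q.2
      · rw [if_pos (by simpa using h), pvCov_cons, pvCov_cons, ih]
      · rw [if_neg (by simpa using h), ih, pvCov_cons]
        have hf : (decide (q.1 ≤ i) && decide (i < q.2)) = false := by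
          rw [Bool.and_eq_false_iff]
          by_cases h1 : q.1 ≤ i
          · exact Or.inr (by simp; omega)
          · exact Or.inl (by simpa using h1)
        rw [hf, Bool.false_or]

-- sorted2 by (fst, snd) is pairwise nondecreasing in fst
theorem pvInsertBy_pairwise (x : Int × Int) (l : List (Int × Int))
    (hl : l.Pairwise (fun a b : Int × Int => a.1 ≤ b.1)) :
    (PySem.List.insertBy
      (fun a b : Int × Int => decide (a.1 < b.1) || (!decide (b.1 < a.1) && decide (a.2 < b.2)))
      x l).Pairwise (fun a b : Int × Int => a.1 ≤ b.1) := by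
  induction l with
  | nil => simp [PySem.List.insertBy]
  | cons y ys ih =>
      rw [PySem.List.insertBy]
      by_cases hb : (decide (x.1 < y.1) || (!decide (y.1 < x.1) && decide (x.2 < y.2))) = true
      · rw [if_pos hb]
        have hxy : x.1 ≤ y.1 := by
          rcases Bool.or_eq_true_iff.mp hb with h | h
          · exact le_of_lt (by simpa using h)
          · have := (Bool.and_eq_true_iff.mp h).1
            simp only [Bool.not_eq_true', decide_eq_false_iff_not, not_lt] at this
            exact this
        constructor
        · intro b hb'
          rcases List.mem_cons.mp hb' with rfl | h
          · exact hxy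
          · exact le_trans hxy ((List.pairwise_cons.mp hl).1 b h)
        · exact hl
      · rw [if_neg hb]
        rcases List.pairwise_cons.mp hl with ⟨hy, hys⟩
        constructor
        · intro b hbmem
          rw [PySem.List.mem_insertBy] at hbmem
          rcases hbmem with rfl | h
          · -- before x y = false ⇒ y.1 ≤ x.1
            simp only [Bool.or_eq_true, Bool.and_eq_true, Bool.not_eq_true',
              decide_eq_true_eq, decide_eq_false_iff_not, not_or, not_and] at hb
            omega
          · exact hy b h
        · exact ih hys

theorem pvSorted2_pairwise (xs : List (Int × Int)) :
    (PySem.List.sorted2 xs Prod.fst Prod.snd false).Pairwise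
      (fun a b : Int × Int => a.1 ≤ b.1) := by
  rw [PySem.List.sorted2]
  simp only [if_neg (by decide : ¬ (false = true))]
  induction xs using List.reverseRecOn with
  | nil => simp
  | append_singleton t x ih =>
      rw [List.foldl_append, List.foldl_cons, List.foldl_nil]
      exact pvInsertBy_pairwise x _ ih

-- the merge loop, written as a recursion (related to the port's foldl below)
def pvMergeRec (cl ch : Int) : List (Int × Int) → List (Int × Int)
  | [] => [(cl, ch)]
  | (lo, hi) :: rest =>
      if lo ≤ ch then pvMergeRec cl (max ch hi) rest
      else (cl, ch) :: pvMergeRec lo hi rest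

theorem pvFoldl_mergeStep (rest : List (Int × Int)) :
    ∀ (out : List (Int × Int)) (cl ch : Int),
      (fun s : List (Int × Int) × Int × Int => s.1 ++ [(s.2.1, s.2.2)])
          (rest.foldl pvMergeStep (out, cl, ch)) = out ++ pvMergeRec cl ch rest := by
  induction rest with
  | nil => intro out cl ch; simp [pvMergeRec]
  | cons p t ih =>
      intro out cl ch
      rw [List.foldl_cons]
      by_cases h : p.1 ≤ ch
      · rw [pvMergeStep, if_pos h]
        show (fun s : List (Int × Int) × Int × Int => s.1 ++ [(s.2.1, s.2.2)])
            (t.foldl pvMergeStep (out, cl, max ch p.2)) = _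
        rw [ih out cl (max ch p.2), pvMergeRec]
        obtain ⟨lo, hi⟩ := p
        simp only at h ⊢
        rw [if_pos h]
      · rw [pvMergeStep, if_neg h]
        show (fun s : List (Int × Int) × Int × Int => s.1 ++ [(s.2.1, s.2.2)])
            (t.foldl pvMergeStep (out ++ [(cl, ch)], p.1, p.2)) = _
        rw [ih (out ++ [(cl, ch)]) p.1 p.2, pvMergeRec]
        obtain ⟨lo, hi⟩ := p
        simp only at h ⊢
        rw [if_neg h, List.append_assoc, List.singleton_append]

theorem pvMergeRec_cov (ms : List (Int × Int)) :
    ∀ (cl ch : Int), (∀ q ∈ ms, cl ≤ q.1) →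
      ms.Pairwise (fun a b : Int × Int => a.1 ≤ b.1) →
      ∀ i, pvCov (pvMergeRec cl ch ms) i =
        ((decide (cl ≤ i) && decide (i < ch)) || pvCov ms i) := by
  induction ms with
  | nil => intro cl ch _ _ i; simp [pvMergeRec, pvCov]
  | cons p t ih =>
      intro cl ch hlb hpw i
      obtain ⟨lo, hi⟩ := p
      rcases List.pairwise_cons.mp hpw with ⟨hp1, hp2⟩
      have hcl_lo : cl ≤ lo := hlb (lo, hi) (List.mem_cons_self)
      rw [pvMergeRec]
      by_cases h : lo ≤ ch
      · rw [if_pos h, ih cl (max ch hi) (fun q hq => hlb q (List.mem_cons_of_mem _ hq)) hp2 i,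
          pvCov_cons]
        cases hX : pvCov t i with
        | false =>
            simp only [Bool.or_false]
            rw [Bool.eq_iff_iff]
            simp only [Bool.or_eq_true, Bool.and_eq_true, decide_eq_true_eq]
            omega
        | true => simp
      · rw [if_neg h, pvCov_cons, pvCov_cons,
          ih lo hi (fun q hq => hp1 q hq) hp2 i]

theorem pvMergeRec_lb (ms : List (Int × Int)) :
    ∀ (cl ch : Int), (∀ q ∈ ms, cl ≤ q.1) →
      ms.Pairwise (fun a b : Int × Int => a.1 ≤ b.1) →
      ∀ q ∈ pvMergeRec cl ch ms, cl ≤ q.1 := by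
  induction ms with
  | nil => intro cl ch _ _ q hq; simp [pvMergeRec] at hq; simp [hq]
  | cons p t ih =>
      intro cl ch hlb hpw q hq
      obtain ⟨lo, hi⟩ := p
      rcases List.pairwise_cons.mp hpw with ⟨hp1, hp2⟩
      have hcl_lo : cl ≤ lo := hlb (lo, hi) (List.mem_cons_self)
      rw [pvMergeRec] at hq
      by_cases h : lo ≤ ch
      · rw [if_pos h] at hq
        exact ih cl (max ch hi) (fun r hr => hlb r (List.mem_cons_of_mem _ hr)) hp2 q hq
      · rw [if_neg h] at hq
        rcases List.mem_cons.mp hq with rfl | hq'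
        · simp
        · exact le_trans hcl_lo (ih lo hi (fun r hr => hp1 r hr) hp2 q hq')

theorem pvMergeRec_ne_nil (ms : List (Int × Int)) :
    ∀ (cl ch : Int), pvMergeRec cl ch ms ≠ [] := by
  induction ms with
  | nil => intro cl ch; simp [pvMergeRec]
  | cons p t ih =>
      intro cl ch
      obtain ⟨lo, hi⟩ := p
      rw [pvMergeRec]
      by_cases h : lo ≤ ch
      · rw [if_pos h]; exact ih cl (max ch hi)
      · rw [if_neg h]; simp

theorem pvMergeRec_shape (ms : List (Int × Int)) :
    ∀ (cl ch : Int), cl < ch → (∀ q ∈ ms, q.1 < q.2) →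
      ms.Pairwise (fun a b : Int × Int => a.1 ≤ b.1) →
      pvShape (pvMergeRec cl ch ms) := by
  induction ms with
  | nil =>
      intro cl ch hclch _ _
      show pvShape [(cl, ch)]
      exact ⟨List.pairwise_singleton _ _, by intro q hq; rw [List.mem_singleton] at hq; subst hq; exact hclch⟩
  | cons p t ih =>
      intro cl ch hclch hprop hpw
      obtain ⟨lo, hi⟩ := p
      rcases List.pairwise_cons.mp hpw with ⟨hp1, hp2⟩
      have hlohi : lo < hi := hprop (lo, hi) (List.mem_cons_self)
      rw [pvMergeRec]
      by_cases h : lo ≤ ch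
      · rw [if_pos h]
        exact ih cl (max ch hi) (by omega)
          (fun q hq => hprop q (List.mem_cons_of_mem _ hq)) hp2
      · rw [if_neg h]
        have hrec := ih lo hi hlohi (fun q hq => hprop q (List.mem_cons_of_mem _ hq)) hp2
        have hlb := pvMergeRec_lb t lo hi (fun q hq => hp1 q hq) hp2
        constructor
        · rw [List.pairwise_cons]
          refine ⟨fun q hq => ?_, hrec.1⟩
          have := hlb q hq
          omega
        · intro q hq
          rcases List.mem_cons.mp hq with rfl | hq'
          · exact hclch
          · exact hrec.2 q hq'

-- build loop vs filtered enumeration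
theorem pvU_congr (ft : List Char) (s : Int) (p q : Int → Bool)
    (h : ∀ i, s ≤ i → i < s + ft.length → p i = q i) :
    pvU ft s p = pvU ft s q := by
  unfold pvU
  rw [List.filter_congr]
  intro x hx
  rw [PySem.List.mem_enumerate_iff] at hx
  obtain ⟨k, hk, rfl⟩ := hx
  exact h _ (by omega) (by omega)

theorem pvU_drop (ft : List Char) : ∀ (s cur : Int),
    pvU ft s (fun i => decide (cur ≤ i)) = ft.drop (cur - s).toNat := by
  induction ft with
  | nil => intro s cur; simp [pvU, PySem.List.enumerate_nil]
  | cons c t ih =>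
      intro s cur
      unfold pvU
      rw [PySem.List.enumerate_cons, List.filter_cons]
      by_cases h : cur ≤ s
      · rw [if_pos (by simpa using h)]
        have : (cur - s).toNat = 0 := by omega
        rw [this, List.drop_zero, List.map_cons]
        have := ih (s + 1) cur
        unfold pvU at this
        rw [this]
        have : (cur - (s + 1)).toNat = 0 := by omega
        rw [this, List.drop_zero]
      · rw [if_neg (by simpa using h)]
        have := ih (s + 1) cur
        unfold pvU at this
        rw [this]
        have h1 : (cur - s).toNat = (cur - (s + 1)).toNat + 1 := by omega
        rw [h1, List.drop_succ_cons]

theorem pvU_false (ft : List Char) (s : Int) (p : Int → Bool)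
    (h : ∀ i, s ≤ i → i < s + ft.length → p i = false) :
    pvU ft s p = [] := by
  unfold pvU
  rw [List.filter_congr (q := fun _ => false) (fun x hx => by
    rw [PySem.List.mem_enumerate_iff] at hx
    obtain ⟨k, hk, rfl⟩ := hx
    exact h _ (by omega) (by omega))]
  simp

theorem pvU_split (ft : List Char) (s : Int) (p : Int → Bool) (k : Nat) :
    pvU ft s p = pvU (ft.take k) s p ++ pvU (ft.drop k) (s + (ft.take k).length) p := by
  unfold pvU
  conv_lhs => rw [← List.take_append_drop k ft]
  rw [PySem.List.enumerate_append, List.filter_append, List.map_append]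

theorem pvJoin_nil_flatten (ls : List (List Char)) : PySem.Chars.join [] ls = ls.flatten := by
  induction ls with
  | nil => rfl
  | cons x xs ih =>
      cases xs with
      | nil => simp [PySem.Chars.join, List.intercalate]
      | cons y ys =>
          rw [PySem.Chars.join_cons_cons, List.flatten_cons, ← ih]
          simp

theorem pvCov_false_of_lt (ms : List (Int × Int)) (i : Int) (h : ∀ q ∈ ms, i < q.1) :
    pvCov ms i = false := by
  unfold pvCov
  rw [List.any_eq_false]
  intro q hq
  simp only [Bool.and_eq_true, decide_eq_true_eq, not_and]
  intro h1
  have := h q hq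
  omega

theorem pvU_true (ft : List Char) (s : Int) (p : Int → Bool)
    (h : ∀ i, s ≤ i → i < s + ft.length → p i = true) :
    pvU ft s p = ft := by
  unfold pvU
  rw [List.filter_congr (q := fun _ => true) (fun x hx => by
    rw [PySem.List.mem_enumerate_iff] at hx
    obtain ⟨k, hk, rfl⟩ := hx
    exact h _ (by omega) (by omega))]
  rw [List.filter_true]
  simp [PySem.List.map_snd_enumerate]

theorem pvBuild_eq_U (ms : List (Int × Int)) :
    ∀ (ft : List Char) (cur : Int), 0 ≤ cur → pvShape ms →
      PySem.Chars.join [] (pvBuildParts ft (ft.length : Int) cur ms) =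
        pvU ft 0 (fun i => decide (cur ≤ i) && !pvCov ms i) := by
  induction ms with
  | nil =>
      intro ft cur hcur _
      rw [pvBuildParts, pvJoin_nil_flatten, List.flatten_cons, List.flatten_nil,
        List.append_nil, PySem.List.slice_from ft hcur]
      rw [pvU_congr ft 0 _ (fun i => decide (cur ≤ i))
        (by intro i _ _; rw [pvCov_nil]; simp)]
      rw [pvU_drop ft 0 cur]
      norm_num
  | cons p rest ih =>
      intro ft cur hcur hshape
      obtain ⟨lo, hi⟩ := p
      rcases hshape with ⟨hpw, hprop⟩
      rcases List.pairwise_cons.mp hpw with ⟨hsep, hpw2⟩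
      have hlohi : lo < hi := hprop (lo, hi) (List.mem_cons_self)
      have hshape2 : pvShape rest := ⟨hpw2, fun q hq => hprop q (List.mem_cons_of_mem _ hq)⟩
      rw [pvBuildParts]
      by_cases hbr : lo > (ft.length : Int)
      · rw [if_pos hbr, pvJoin_nil_flatten, List.flatten_cons, List.flatten_nil,
          List.append_nil, PySem.List.slice_from ft hcur]
        rw [pvU_congr ft 0 _ (fun i => decide (cur ≤ i)) (by
          intro i hi0 hilen
          have hc : pvCov ((lo, hi) :: rest) i = false := by
            rw [pvCov_cons, pvCov_false_of_lt rest i (fun q hq => by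
              have := hsep q hq; omega)]
            have : (decide (lo ≤ i)) = false := by simp; omega
            rw [this, Bool.false_and, Bool.false_or]
          rw [hc]
          simp)]
        rw [pvU_drop ft 0 cur]
        norm_num
      · rw [if_neg hbr]
        rw [not_lt] at hbr
        have hcur' : 0 ≤ max cur (min hi (ft.length : Int)) := le_trans hcur (le_max_left _ _)
        have hih := ih ft (max cur (min hi (ft.length : Int))) hcur' hshape2
        rw [pvJoin_nil_flatten, List.flatten_append, ← pvJoin_nil_flatten
          (pvBuildParts ft (ft.length : Int) (max cur (min hi (ft.length : Int))) rest), hih]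
        by_cases hcl : cur < lo
        · rw [if_pos hcl]
          have hlo0 : 0 ≤ lo := by omega
          have hk : lo.toNat ≤ ft.length := by omega
          have htk : (ft.take lo.toNat).length = lo.toNat := by
            rw [List.length_take]; omega
          rw [List.flatten_cons, List.flatten_nil, List.append_nil,
            PySem.List.slice_toNat ft hcur hlo0]
          rw [pvU_split ft 0 (fun i => decide (cur ≤ i) && !pvCov ((lo, hi) :: rest) i) lo.toNat,
            pvU_split ft 0
            (fun i => decide (max cur (min hi (ft.length : Int)) ≤ i) && !pvCov rest i) lo.toNat]
          have hA : pvU (ft.take lo.toNat) 0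
              (fun i => decide (cur ≤ i) && !pvCov ((lo, hi) :: rest) i) =
              List.take (lo.toNat - cur.toNat) (List.drop cur.toNat ft) := by
            rw [pvU_congr _ 0 _ (fun i => decide (cur ≤ i)) (by
              intro i hi0 hilen
              rw [htk] at hilen
              have hc : pvCov ((lo, hi) :: rest) i = false := by
                rw [pvCov_cons, pvCov_false_of_lt rest i (fun q hq => by
                  have := hsep q hq; omega)]
                have : (decide (lo ≤ i)) = false := by simp; omega
                rw [this, Bool.false_and, Bool.false_or]
              rw [hc]; simp)]
            rw [pvU_drop _ 0 cur]
            simp only [sub_zero]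
            rw [List.drop_take]
          have hB : pvU (ft.take lo.toNat) 0
              (fun i => decide (max cur (min hi (ft.length : Int)) ≤ i) && !pvCov rest i) = [] := by
            apply pvU_false
            intro i hi0 hilen
            rw [htk] at hilen
            have : (decide (max cur (min hi (ft.length : Int)) ≤ i)) = false := by
              simp; omega
            rw [this, Bool.false_and]
          have hC : pvU (ft.drop lo.toNat) (0 + ((ft.take lo.toNat).length : Int))
              (fun i => decide (cur ≤ i) && !pvCov ((lo, hi) :: rest) i) =
              pvU (ft.drop lo.toNat) (0 + ((ft.take lo.toNat).length : Int))
              (fun i => decide (max cur (min hi (ft.length : Int)) ≤ i) && !pvCov rest i) := by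
            apply pvU_congr
            intro i hi1 hi2
            rw [htk] at hi1 hi2
            rw [List.length_drop] at hi2
            have hge : lo ≤ i := by omega
            have hlt : i < (ft.length : Int) := by omega
            rw [pvCov_cons]
            cases hX : pvCov rest i with
            | true => simp
            | false =>
                simp only [Bool.or_false, Bool.not_false, Bool.and_true]
                rw [Bool.eq_iff_iff]
                simp only [Bool.and_eq_true, Bool.not_eq_true', Bool.and_eq_false_iff,
                  decide_eq_true_eq, decide_eq_false_iff_not]
                omega
          rw [hA, hB, hC, List.nil_append]
        · rw [if_neg hcl, List.flatten_nil, List.nil_append]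
          apply pvU_congr
          intro i hi0 hilen
          rw [pvCov_cons]
          cases hX : pvCov rest i with
          | true => simp
          | false =>
              simp only [Bool.or_false, Bool.not_false, Bool.and_true]
              rw [Bool.eq_iff_iff]
              simp only [Bool.and_eq_true, Bool.not_eq_true', Bool.and_eq_false_iff,
                decide_eq_true_eq, decide_eq_false_iff_not]
              omega

-- ===== B-side lemmas: difference array = coverage count =====

-- the two loop bodies of B, named for the proofs (definitionally the port's lambdas)
def pvStep (n : Int) (d : List Int) (p : Int × Int) : List Int :=
  let lo2 := max p.1 0
  let hi2 := min p.2 n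
  if lo2 < hi2 then
    let d1 := PySem.List.pySetD d lo2 (PySem.List.pyGetD d lo2 0 + 1)
    PySem.List.pySetD d1 hi2 (PySem.List.pyGetD d1 hi2 0 - 1)
  else d

def pvDeltaL (n : Int) (spans : List (Int × Int)) : List Int :=
  spans.foldl (pvStep n) (List.replicate (n.toNat + 1) (0 : Int))

def pvScanStep (delta : List Int) (s : List Char × Int) (p : Int × Char) : List Char × Int :=
  let depth := s.2 + PySem.List.pyGetD delta p.1 0
  (if depth = 0 then s.1 ++ [p.2] else s.1, depth)

def pvCnt (spans : List (Int × Int)) (n : Int) (j : Nat) : Nat :=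
  spans.countP (fun q => decide (max q.1 0 ≤ (j : Int)) && decide ((j : Int) < min q.2 n))

theorem pvSetD_eq_set (l : List Int) (i : Int) (v : Int) (h0 : 0 ≤ i) (h1 : i < l.length) :
    PySem.List.pySetD l i v = l.set i.toNat v := by
  rw [PySem.List.pySetD, PySem.List.pySet?, PySem.List.pyIdx?, if_pos h0, if_pos h1]
  rfl

theorem pvGetD_eq_getD (l : List Int) (i : Int) (h0 : 0 ≤ i) (h1 : i < l.length) :
    PySem.List.pyGetD l i 0 = l.getD i.toNat 0 := by
  rw [PySem.List.pyGetD_eq_getElem l 0 h0 h1, List.getD_eq_getElem?_getD,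
    List.getElem?_eq_getElem (by omega), Option.getD_some]

theorem pvLen_pySetD (l : List Int) (i : Int) (v : Int) :
    (PySem.List.pySetD l i v).length = l.length := by
  rw [PySem.List.pySetD, PySem.List.pySet?, PySem.List.pyIdx?]
  split <;> split <;> simp

theorem pvLen_step (n : Int) (d : List Int) (p : Int × Int) :
    (pvStep n d p).length = d.length := by
  unfold pvStep
  by_cases h : max p.1 0 < min p.2 n
  · rw [if_pos h, pvLen_pySetD, pvLen_pySetD]
  · rw [if_neg h]

theorem pvDeltaL_length (n : Int) (spans : List (Int × Int)) :
    (pvDeltaL n spans).length = n.toNat + 1 := by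
  unfold pvDeltaL
  induction spans using List.reverseRecOn with
  | nil => simp
  | append_singleton t p ih => rw [List.foldl_append, List.foldl_cons, List.foldl_nil,
      pvLen_step, ih]

theorem pvSum_take_set (l : List Int) (k m : Nat) (v : Int) (hk : k < l.length) :
    ((l.set k v).take m).sum = (l.take m).sum + (if k < m then v - l[k] else 0) := by
  rw [List.take_set]
  by_cases hkm : k < m
  · have hk' : k < (l.take m).length := by
      rw [List.length_take]; omega
    rw [List.sum_set, if_pos hk', if_pos hkm]
    conv_rhs => rw [← List.set_getElem_self hk', List.sum_set]
    rw [if_pos hk']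
    have hgt : (l.take m)[k] = l[k] := List.getElem_take
    rw [hgt]
    ring
  · have hle : (l.take m).length ≤ k := by
      rw [List.length_take]; omega
    rw [List.set_eq_of_length_le hle, if_neg hkm, add_zero]

theorem pvSum_take_set_add (l : List Int) (k m : Nat) (c : Int) (hk : k < l.length) :
    ((l.set k (l.getD k 0 + c)).take m).sum = (l.take m).sum + (if k < m then c else 0) := by
  rw [pvSum_take_set l k m _ hk]
  have hgd : l.getD k 0 = l[k] := by
    rw [List.getD_eq_getElem?_getD, List.getElem?_eq_getElem hk, Option.getD_some]
  rw [hgd]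
  congr 1
  split_ifs <;> ring

theorem pvPS_succ (l : List Int) (k : Nat) :
    (l.take (k + 1)).sum = (l.take k).sum + l.getD k 0 := by
  rw [List.take_add_one, List.sum_append, List.getD_eq_getElem?_getD]
  cases l[k]? <;> simp

theorem pvStep_prefix (n : Int) (d : List Int) (p : Int × Int) (j : Nat)
    (hdlen : d.length = n.toNat + 1) (hn : 0 ≤ n) :
    ((pvStep n d p).take (j + 1)).sum = (d.take (j + 1)).sum +
      (if max p.1 0 ≤ (j : Int) ∧ (j : Int) < min p.2 n then 1 else 0) := by
  unfold pvStep
  by_cases hlt : max p.1 0 < min p.2 n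
  · rw [if_pos hlt]
    have hlo0 : 0 ≤ max p.1 0 := le_max_right _ _
    have hhi0 : 0 ≤ min p.2 n := le_trans hlo0 (le_of_lt hlt)
    have hloL : max p.1 0 < (d.length : Int) := by rw [hdlen]; push_cast; omega
    have hhiL : min p.2 n < (d.length : Int) := by rw [hdlen]; push_cast; omega
    rw [pvGetD_eq_getD d _ hlo0 hloL, pvSetD_eq_set d _ _ hlo0 hloL]
    have hd1len : (d.set (max p.1 0).toNat (d.getD (max p.1 0).toNat 0 + 1)).length
        = d.length := List.length_set
    have hhiL1 : min p.2 n <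
        ((d.set (max p.1 0).toNat (d.getD (max p.1 0).toNat 0 + 1)).length : Int) := by
      rw [hd1len]; exact hhiL
    dsimp only
    rw [pvGetD_eq_getD _ _ hhi0 hhiL1, pvSetD_eq_set _ _ _ hhi0 hhiL1]
    have hsub : ∀ x : Int, x - 1 = x + (-1) := by intro x; ring
    rw [hsub]
    have hk1 : (max p.1 0).toNat < d.length := by omega
    have hk2 : (min p.2 n).toNat <
        (d.set (max p.1 0).toNat (d.getD (max p.1 0).toNat 0 + 1)).length := by
      rw [hd1len]; omega
    rw [pvSum_take_set_add _ _ _ _ hk2, pvSum_take_set_add _ _ _ _ hk1]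
    have c1 : ((max p.1 0).toNat < j + 1) ↔ (max p.1 0 ≤ (j : Int)) := by omega
    have c2 : ((min p.2 n).toNat < j + 1) ↔ (min p.2 n ≤ (j : Int)) := by omega
    split_ifs with h1 h2 h3 h4 h5 <;> omega
  · rw [if_neg hlt]
    have : ¬ (max p.1 0 ≤ (j : Int) ∧ (j : Int) < min p.2 n) := by omega
    rw [if_neg this, add_zero]

theorem pvDelta_prefix (n : Int) (hn : 0 ≤ n) (spans : List (Int × Int)) (j : Nat) :
    ((pvDeltaL n spans).take (j + 1)).sum = (pvCnt spans n j : Int) := by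
  induction spans using List.reverseRecOn with
  | nil =>
      unfold pvDeltaL pvCnt
      simp [List.take_replicate]
  | append_singleton t p ih =>
      have hstep : pvDeltaL n (t ++ [p]) = pvStep n (pvDeltaL n t) p := by
        unfold pvDeltaL
        rw [List.foldl_append, List.foldl_cons, List.foldl_nil]
      have hcnt : (pvCnt (t ++ [p]) n j : Int) = (pvCnt t n j : Int) +
          (if max p.1 0 ≤ (j : Int) ∧ (j : Int) < min p.2 n then 1 else 0) := by
        unfold pvCnt
        rw [List.countP_append]
        by_cases hp : max p.1 0 ≤ (j : Int) ∧ (j : Int) < min p.2 n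
        · have hpred : (decide (max p.1 0 ≤ (j : Int)) && decide ((j : Int) < min p.2 n))
              = true := by
            rw [Bool.and_eq_true]
            exact ⟨decide_eq_true hp.1, decide_eq_true hp.2⟩
          rw [if_pos hp, List.countP_cons, List.countP_nil, hpred, if_pos rfl]
          push_cast
          ring
        · have hpred : (decide (max p.1 0 ≤ (j : Int)) && decide ((j : Int) < min p.2 n))
              = false := by
            rw [Bool.and_eq_false_iff]
            rcases not_and_or.mp hp with h | h
            · exact Or.inl (decide_eq_false h)
            · exact Or.inr (decide_eq_false h)
          rw [if_neg hp, List.countP_cons, List.countP_nil, hpred,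
            if_neg Bool.false_ne_true]
          push_cast
          ring
      rw [hstep, hcnt, pvStep_prefix n (pvDeltaL n t) p j (pvDeltaL_length n t) hn, ih]

theorem pvCnt_zero_iff (spans : List (Int × Int)) (n : Int) (k : Nat) (hk : (k : Int) < n) :
    pvCnt spans n k = 0 ↔ pvCov spans (k : Int) = false := by
  unfold pvCnt pvCov
  rw [List.countP_eq_zero, List.any_eq_false]
  constructor <;> intro h q hq <;> have hx := h q hq <;>
    simp only [Bool.and_eq_true, decide_eq_true_eq, not_and] at hx ⊢ <;> omega

theorem pvScan_spec (delta : List Int) (spans : List (Int × Int)) (n : Int)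
    (hcnt : ∀ k : Nat, (k : Int) < n →
      ((delta.take (k + 1)).sum = 0 ↔ pvCov spans (k : Int) = false)) :
    ∀ (xs : List Char) (s : Nat) (acc : List Char), (s : Int) + xs.length ≤ n →
      ((PySem.List.enumerate xs (s : Int)).foldl (pvScanStep delta)
          (acc, (delta.take s).sum)).1
        = acc ++ ((PySem.List.enumerate xs (s : Int)).filter
            (fun p => !pvCov spans p.1)).map Prod.snd := by
  intro xs
  induction xs with
  | nil => intro s acc _; simp [PySem.List.enumerate_nil]
  | cons x t ih =>
      intro s acc hb
      rw [List.length_cons] at hb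
      rw [PySem.List.enumerate_cons, List.foldl_cons, List.filter_cons]
      have hdepth : pvScanStep delta (acc, (delta.take s).sum) ((s : Int), x) =
          (if (delta.take (s + 1)).sum = 0 then acc ++ [x] else acc,
            (delta.take (s + 1)).sum) := by
        unfold pvScanStep
        rw [PySem.List.pyGetD_natCast, ← pvPS_succ]
      have hsn : (s : Int) < n := by
        push_cast at hb ⊢; omega
      have hcast : (s : Int) + 1 = ((s + 1 : Nat) : Int) := by push_cast; ring
      have hb' : ((s + 1 : Nat) : Int) + (t.length : Int) ≤ n := by
        push_cast at hb ⊢; omega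
      rw [hdepth]
      by_cases hc : pvCov spans (s : Int) = false
      · rw [if_pos ((hcnt s hsn).mpr hc)]
        have hkeep : (!pvCov spans ((s : Int), x).1) = true := by
          show (!pvCov spans (s : Int)) = true
          rw [hc]
          rfl
        rw [if_pos hkeep, hcast, ih (s + 1) (acc ++ [x]) hb', List.map_cons]
        simp
      · rw [if_neg (fun h => hc ((hcnt s hsn).mp h))]
        have hct : pvCov spans (s : Int) = true := Bool.ne_false_iff.mp hc
        have hkeep : (!pvCov spans ((s : Int), x).1) = false := by
          show (!pvCov spans (s : Int)) = false
          rw [hct]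
          rfl
        rw [if_neg (by rw [hkeep]; exact Bool.false_ne_true), hcast, ih (s + 1) acc hb']

theorem pvAlt_eq (ft : String) (spans : List (Int × Int)) :
    build_body_without_spans_alt ft spans =
      String.ofList (pvU ft.toList 0 (fun i => !pvCov spans i)) := by
  have h0 : build_body_without_spans_alt ft spans = String.ofList
      (((PySem.List.enumerate ft.toList (0 : Int)).foldl
          (pvScanStep (pvDeltaL (PySem.Str.len ft) spans)) ([], 0)).1) := rfl
  have hlen : PySem.Str.len ft = (ft.toList.length : Int) := PySem.Str.len_eq ft
  have hn : 0 ≤ PySem.Str.len ft := by rw [hlen]; positivity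
  have hcnt : ∀ k : Nat, (k : Int) < PySem.Str.len ft →
      (((pvDeltaL (PySem.Str.len ft) spans).take (k + 1)).sum = 0 ↔
        pvCov spans (k : Int) = false) := by
    intro k hk
    rw [pvDelta_prefix (PySem.Str.len ft) hn spans k]
    rw [show ((pvCnt spans (PySem.Str.len ft) k : Int) = 0) ↔
        (pvCnt spans (PySem.Str.len ft) k = 0) from by exact_mod_cast Iff.rfl]
    exact pvCnt_zero_iff spans (PySem.Str.len ft) k hk
  rw [h0]
  congr 1
  have hinit : ((0 : Int)) = ((pvDeltaL (PySem.Str.len ft) spans).take 0).sum := by simp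
  have hzero : ((0 : Nat) : Int) = (0 : Int) := by norm_num
  calc ((PySem.List.enumerate ft.toList (0 : Int)).foldl
          (pvScanStep (pvDeltaL (PySem.Str.len ft) spans)) ([], 0)).1
      = ((PySem.List.enumerate ft.toList ((0 : Nat) : Int)).foldl
          (pvScanStep (pvDeltaL (PySem.Str.len ft) spans))
          ([], ((pvDeltaL (PySem.Str.len ft) spans).take 0).sum)).1 := by
        rw [← hinit, hzero]
    _ = [] ++ ((PySem.List.enumerate ft.toList ((0 : Nat) : Int)).filter
          (fun p => !pvCov spans p.1)).map Prod.snd := by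
        apply pvScan_spec (pvDeltaL (PySem.Str.len ft) spans) spans (PySem.Str.len ft) hcnt
          ft.toList 0 []
        rw [hlen]; push_cast; omega
    _ = pvU ft.toList 0 (fun i => !pvCov spans i) := by
        rw [List.nil_append, hzero]
        rfl

-- ===== VERDICT (by name: the statement is the Claim_ definition above) =====
theorem build_body_without_spans_spec : Claim_equal_build_body_without_spans := by
  intro ft spans _
  unfold Spec_build_body_without_spans
  have hB : build_body_without_spans_alt ft spans =
      String.ofList (pvU ft.toList 0 (fun i => !pvCov spans i)) := pvAlt_eq ft spans
  cases hordeq : PySem.List.sorted2 (spans.filter (fun p => decide (p.1 < p.2)))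
      Prod.fst Prod.snd with
  | nil =>
      have hm : merge_intervals spans = [] := by
        unfold merge_intervals; rw [hordeq]
      have hA : build_body_without_spans ft spans = ft := by
        unfold build_body_without_spans; rw [hm]
      have hperm := PySem.List.sorted2_perm
        (spans.filter (fun p => decide (p.1 < p.2))) Prod.fst Prod.snd false
      rw [hordeq] at hperm
      have hfilter : spans.filter (fun p => decide (p.1 < p.2)) = [] :=
        List.perm_nil.mp hperm.symm
      rw [List.filter_eq_nil_iff] at hfilter
      rw [hA, hB, pvU_true ft.toList 0 _ (by
        intro i _ _
        have hc : pvCov spans i = false := by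
          unfold pvCov
          rw [List.any_eq_false]
          intro q hq
          have := hfilter q hq
          simp only [decide_eq_true_eq] at this
          simp only [Bool.and_eq_true, decide_eq_true_eq, not_and]
          omega
        rw [hc, Bool.not_false])]
      simp
  | cons p0 rest =>
      obtain ⟨l0, h0⟩ := p0
      have hperm := PySem.List.sorted2_perm
        (spans.filter (fun p => decide (p.1 < p.2))) Prod.fst Prod.snd false
      rw [hordeq] at hperm
      have hmember : ∀ q ∈ (l0, h0) :: rest, q.1 < q.2 := by
        intro q hq
        have hmf := hperm.mem_iff.mp hq
        have := List.of_mem_filter hmf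
        simpa using this
      have hpwfst := pvSorted2_pairwise (spans.filter (fun p => decide (p.1 < p.2)))
      rw [hordeq] at hpwfst
      rcases List.pairwise_cons.mp hpwfst with ⟨hfst1, hfst2⟩
      have hmrg : merge_intervals spans = pvMergeRec l0 h0 rest := by
        unfold merge_intervals
        rw [hordeq]
        simpa using pvFoldl_mergeStep rest [] l0 h0
      obtain ⟨m0, mrest, hmm⟩ : ∃ a as, pvMergeRec l0 h0 rest = a :: as := by
        cases hmm : pvMergeRec l0 h0 rest with
        | nil => exact absurd hmm (pvMergeRec_ne_nil rest l0 h0)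
        | cons a as => exact ⟨a, as, rfl⟩
      have hA : build_body_without_spans ft spans =
          String.ofList (PySem.Chars.join []
            (pvBuildParts ft.toList (PySem.Str.len ft) 0 (m0 :: mrest))) := by
        unfold build_body_without_spans
        rw [hmrg, hmm]
      have hshape : pvShape (pvMergeRec l0 h0 rest) :=
        pvMergeRec_shape rest l0 h0 (hmember (l0, h0) (List.mem_cons_self))
          (fun q hq => hmember q (List.mem_cons_of_mem _ hq)) hfst2
      have hcov : ∀ i, pvCov (pvMergeRec l0 h0 rest) i = pvCov spans i := by
        intro i
        rw [pvMergeRec_cov rest l0 h0 hfst1 hfst2 i]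
        have h1 : (decide (l0 ≤ i) && decide (i < h0) || pvCov rest i) =
            pvCov ((l0, h0) :: rest) i := by rw [pvCov_cons]
        rw [h1, pvCov_perm hperm i, pvCov_filter]
      have hbuild := pvBuild_eq_U (pvMergeRec l0 h0 rest) ft.toList 0 le_rfl hshape
      rw [hA, ← hmm, PySem.Str.len_eq, hbuild, hB]
      congr 1
      apply pvU_congr
      intro i h0i _
      rw [hcov i]
      have h1 : decide ((0 : Int) ≤ i) = true := by simpa using h0i
      rw [h1, Bool.true_and]
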